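-- pv_equiv track=rewrite | github.com/pcast31/schur | weak_schur_sat/bound_m5/m5_m4.py | break_symmetries
-- ===== SOURCE A (Python) =====
-- def break_symmetries(k):
--     cnf = ["1"]
--     if k >= 3:
--         cnf.append(f"-{k + 3}")
--         cnf.append(f"{k + 2} -{2 * k + 3}")
--     if k >= 4:
--         clause= ""
--         for i in range(1, 9):
--             cnf.append(clause + f"-{k * i + 4}")
--             clause += f"{k * i + 3} "
--     if k >= 5:
--         clause= ""
--         for i in range(1, 24):
--             cnf.append(clause + f"-{k * i + 5}")
--             clause += f"{k * i + 4} "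
--     if k >= 6:
--         clause= ""
--         for i in range(1, 67):
--             cnf.append(clause + f"-{k * i + 6}")
--             clause += f"{k * i + 5} "
--     return cnf
-- ===== SOURCE B (Python) =====
-- def break_symmetries(k):
--     cnf = ["1"]
--     if k >= 3:
--         cnf.append(f"-{k + 3}")
--         cnf.append(f"{k + 2} -{2 * k + 3}")
--     for b, count in ((4, 8), (5, 23), (6, 66)):
--         if k >= b:
--             for j in range(1, count + 1):
--                 cnf.append("".join(f"{k * i + b - 1} " for i in range(1, j)) + f"-{k * j + b}")
--     return cnf
-- ===== Notes on version B (the rewrite author's own statement) =====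
-- stated objective: simpler
-- what changed: The three duplicated accumulator-string loops are collapsed into one table-driven pass over ((4,8),(5,23),(6,66)), and each clause is built directly by joining its prefix terms instead of threading a growing 'clause' string between iterations.
import Mathlib
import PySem

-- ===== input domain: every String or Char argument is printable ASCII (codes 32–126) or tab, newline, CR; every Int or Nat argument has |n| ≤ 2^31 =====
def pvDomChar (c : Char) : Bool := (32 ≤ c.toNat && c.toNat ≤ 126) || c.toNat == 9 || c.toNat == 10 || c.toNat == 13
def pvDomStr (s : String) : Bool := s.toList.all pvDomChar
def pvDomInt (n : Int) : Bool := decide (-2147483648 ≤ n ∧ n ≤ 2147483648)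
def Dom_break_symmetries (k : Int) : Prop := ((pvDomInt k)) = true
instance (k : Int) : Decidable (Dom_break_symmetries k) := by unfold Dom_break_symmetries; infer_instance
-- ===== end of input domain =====

-- B replaces A's three duplicated accumulator-string loops by one table-driven pass that
-- builds each clause directly (objective: simpler; same cost).

-- ===== PORT A =====
def break_symmetries (k : Int) : List String :=
  let cnf : List String := ["1"]
  let cnf := if k ≥ 3 then
      (cnf ++ ["-" ++ PySem.Int.toStr (k + 3)]) ++
        [PySem.Int.toStr (k + 2) ++ " -" ++ PySem.Int.toStr (2 * k + 3)]
    else cnf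
  let cnf := if k ≥ 4 then
      ((PySem.List.pyRange 1 9 1).foldl
        (fun (s : List String × String) i =>
          (s.1 ++ [s.2 ++ ("-" ++ PySem.Int.toStr (k * i + 4))],
           s.2 ++ (PySem.Int.toStr (k * i + 3) ++ " ")))
        (cnf, "")).1
    else cnf
  let cnf := if k ≥ 5 then
      ((PySem.List.pyRange 1 24 1).foldl
        (fun (s : List String × String) i =>
          (s.1 ++ [s.2 ++ ("-" ++ PySem.Int.toStr (k * i + 5))],
           s.2 ++ (PySem.Int.toStr (k * i + 4) ++ " ")))
        (cnf, "")).1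
    else cnf
  let cnf := if k ≥ 6 then
      ((PySem.List.pyRange 1 67 1).foldl
        (fun (s : List String × String) i =>
          (s.1 ++ [s.2 ++ ("-" ++ PySem.Int.toStr (k * i + 6))],
           s.2 ++ (PySem.Int.toStr (k * i + 5) ++ " ")))
        (cnf, "")).1
    else cnf
  cnf

-- ===== PORT B =====
-- one clause of block b: "{k*1+b-1} {k*2+b-1} … {k*(j-1)+b-1} -{k*j+b}"
def pvClause (k b j : Int) : String :=
  PySem.Str.join "" ((PySem.List.pyRange 1 j 1).map (fun i => PySem.Int.toStr (k * i + b - 1) ++ " "))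
    ++ ("-" ++ PySem.Int.toStr (k * j + b))

def break_symmetries_alt (k : Int) : List String :=
  let cnf : List String := ["1"]
  let cnf := if k ≥ 3 then
      cnf ++ ["-" ++ PySem.Int.toStr (k + 3),
              PySem.Int.toStr (k + 2) ++ " -" ++ PySem.Int.toStr (2 * k + 3)]
    else cnf
  [((4 : Int), (8 : Int)), (5, 23), (6, 66)].foldl
    (fun cnf p =>
      if k ≥ p.1 then cnf ++ (PySem.List.pyRange 1 (p.2 + 1) 1).map (pvClause k p.1)
      else cnf) cnf

-- ===== PRECONDITION & SPEC =====
def Spec_break_symmetries (k : Int) (out : List String) : Prop := out = break_symmetries_alt k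
instance (k : Int) (out : List String) : Decidable (Spec_break_symmetries k out) := by unfold Spec_break_symmetries; infer_instance

-- ===== CLAIM (what is proved, stated in full; the proofs are below) =====
def Claim_equal_break_symmetries : Prop := ∀ (k : Int), Dom_break_symmetries k → Spec_break_symmetries k (break_symmetries k)

-- ===== LEMMAS AND PROOFS =====

-- ''.join over an empty separator concatenates
lemma pvJoin_cons (x : String) (l : List String) :
    PySem.Str.join "" (x :: l) = x ++ PySem.Str.join "" l := by
  have h : ∀ (m : List (List Char)), ([] : List Char).intercalate m = m.flatten := by
    intro m
    simp [List.intercalate]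
    induction m with
    | nil => simp
    | cons a t ih => cases t <;> simp_all [List.intersperse]
  simp [PySem.Str.join, PySem.Chars.join, h, String.ofList_append, String.ofList_toList]

lemma pvJoin_append (l₁ l₂ : List String) :
    PySem.Str.join "" (l₁ ++ l₂) = PySem.Str.join "" l₁ ++ PySem.Str.join "" l₂ := by
  induction l₁ with
  | nil => simp [show PySem.Str.join "" ([] : List String) = "" from rfl]
  | cons x t ih => simp [pvJoin_cons, ih, String.append_assoc]

-- A's accumulator string just before iteration m of block b
def pvPref (k b m : Int) : String :=
  PySem.Str.join "" ((PySem.List.pyRange 1 m 1).map (fun i => PySem.Int.toStr (k * i + b - 1) ++ " "))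

lemma pvPref_succ (k b m : Int) (h : 1 ≤ m) :
    pvPref k b (m + 1) = pvPref k b m ++ (PySem.Int.toStr (k * m + (b - 1)) ++ " ") := by
  unfold pvPref
  rw [PySem.List.pyRange_one_succ_right h, List.map_append, pvJoin_append]
  simp [pvJoin_cons, show PySem.Str.join "" ([] : List String) = "" from rfl,
    show k * m + b - 1 = k * m + (b - 1) by ring]

lemma pvClause_eq (k b j : Int) :
    pvClause k b j = pvPref k b j ++ ("-" ++ PySem.Int.toStr (k * j + b)) := rfl

-- the loop invariant of A's accumulator loop
lemma pvLoop_inv (k b n : Int) : ∀ (m : Int), 1 ≤ m → ∀ (cnf : List String),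
    ((PySem.List.pyRange m n 1).foldl
      (fun (s : List String × String) i =>
        (s.1 ++ [s.2 ++ ("-" ++ PySem.Int.toStr (k * i + b))],
         s.2 ++ (PySem.Int.toStr (k * i + (b - 1)) ++ " ")))
      (cnf, pvPref k b m)).1
    = cnf ++ (PySem.List.pyRange m n 1).map (pvClause k b) := by
  intro m hm cnf
  have key : ∀ (N : Nat) (m : Int), 1 ≤ m → (n - m).toNat = N → ∀ (cnf : List String),
        ((PySem.List.pyRange m n 1).foldl
          (fun (s : List String × String) i =>
            (s.1 ++ [s.2 ++ ("-" ++ PySem.Int.toStr (k * i + b))],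
             s.2 ++ (PySem.Int.toStr (k * i + (b - 1)) ++ " ")))
          (cnf, pvPref k b m)).1
        = cnf ++ (PySem.List.pyRange m n 1).map (pvClause k b) := by
    intro N
    induction N with
    | zero =>
      intro m hm hN cnf
      have : n ≤ m := by omega
      rw [PySem.List.pyRange_one_eq_nil this]; simp
    | succ N ih =>
      intro m hm hN cnf
      have hlt : m < n := by omega
      rw [PySem.List.pyRange_one_cons hlt]
      simp only [List.foldl_cons, List.map_cons]
      rw [← pvPref_succ k b m hm]
      rw [ih (m + 1) (by omega) (by omega) (cnf ++ [pvPref k b m ++ ("-" ++ PySem.Int.toStr (k * m + b))])]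
      rw [pvClause_eq]
      simp
  exact key (n - m).toNat m hm rfl cnf

-- one whole block of A equals the mapped clauses of B
lemma pvBlock_eq (k b c n : Int) (hc : c = b - 1) (cnf : List String) :
    ((PySem.List.pyRange 1 n 1).foldl
      (fun (s : List String × String) i =>
        (s.1 ++ [s.2 ++ ("-" ++ PySem.Int.toStr (k * i + b))],
         s.2 ++ (PySem.Int.toStr (k * i + c) ++ " ")))
      (cnf, "")).1
    = cnf ++ (PySem.List.pyRange 1 n 1).map (pvClause k b) := by
  subst hc
  rw [show ("" : String) = pvPref k b 1 from rfl]
  exact pvLoop_inv k b n 1 le_rfl cnf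

-- ===== VERDICT (by name: the statement is the Claim_ definition above) =====
theorem break_symmetries_spec : Claim_equal_break_symmetries := by
  intro k _
  unfold Spec_break_symmetries break_symmetries break_symmetries_alt
  simp only [List.foldl_cons, List.foldl_nil]
  simp only [pvBlock_eq k 4 3 9 (by norm_num), pvBlock_eq k 5 4 24 (by norm_num),
    pvBlock_eq k 6 5 67 (by norm_num), show ((8 : Int) + 1) = 9 from by norm_num,
    show ((23 : Int) + 1) = 24 from by norm_num, show ((66 : Int) + 1) = 67 from by norm_num]
  split_ifs <;> simp [List.append_assoc]
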